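-- pv_equiv track=rewrite | github.com/max-f/advent-of-code | 2020/d20.py | part1
-- ===== SOURCE A (Python) =====
-- import math
--
-- def part1(edges: dict[int, list[str]]) -> int:
--     """
--     Idea: compare edges of every grid with all other edges: if number of matches is only 2 -> corner grid.
--     Due to commutativity of multiplication ("multiply edge IDs") it does not matter which corner grid is where
--     At least for part 1...
--     """
--     corner_ids = set()
--
--     for id_, all_edges in edges.items():
--         all_other_edges = set(e for k, v in edges.items() if k is not id_ for e in v)
--         matching_edges = calc_matches(all_edges, all_other_edges)
--         if matching_edges == 2:
--             corner_ids.add(id_)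
--
--     return math.prod(corner_ids)
--
-- def calc_matches(edges: list[str], all_other_edges: set[str]) -> int:
--     return sum([1 for e in edges if e in all_other_edges or e[::-1] in all_other_edges])
-- ===== SOURCE B (Python) =====
-- import math
--
-- def part1(edges: dict[int, list[str]]) -> int:
--     # One pass builds an index canonical-edge -> set of owning tile ids;
--     # a second pass counts, per tile, its edges whose class has another owner.
--     owners = {}
--     for tid, es in edges.items():
--         for e in es:
--             owners.setdefault(min(e, e[::-1]), set()).add(tid)
--     result = 1
--     for tid, es in edges.items():
--         matches = sum(1 for e in es
--                       if any(o != tid for o in owners[min(e, e[::-1])]))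
--         if matches == 2:
--             result *= tid
--     return result
-- ===== Notes on version B (the rewrite author's own statement) =====
-- stated objective: faster
-- what changed: Instead of rebuilding the set of all other tiles' edges for every tile and testing each edge and its reversal against it, B builds once a single index from canonical edge (min of edge and its reversal) to the set of owning tile ids, then counts per tile the edges whose class has an owner other than the tile itself, multiplying corner ids on the fly.
import Mathlib
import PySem

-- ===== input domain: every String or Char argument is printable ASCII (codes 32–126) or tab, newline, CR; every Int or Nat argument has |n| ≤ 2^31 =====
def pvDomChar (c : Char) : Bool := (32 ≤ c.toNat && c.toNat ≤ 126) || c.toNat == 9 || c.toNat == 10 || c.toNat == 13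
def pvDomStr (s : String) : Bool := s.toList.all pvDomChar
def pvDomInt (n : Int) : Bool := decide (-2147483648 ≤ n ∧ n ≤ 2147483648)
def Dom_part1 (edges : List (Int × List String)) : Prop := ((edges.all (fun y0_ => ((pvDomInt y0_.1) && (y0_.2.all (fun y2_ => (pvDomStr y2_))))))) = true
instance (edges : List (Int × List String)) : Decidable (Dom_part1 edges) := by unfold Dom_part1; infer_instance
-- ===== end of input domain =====

-- B replaces A's per-tile rebuild of "all other edges" by a single canonical-edge -> owners index
-- built once, then a per-tile count; same return value, one pass over the edges instead of a nested one.

-- e[::-1]  (= PySem.Str.slice? e none none (-1), which is some (String.ofList e.toList.reverse); exact)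
def pyRev (s : String) : String := String.ofList s.toList.reverse

-- ===== PORT A =====
-- sum([1 for e in edges if e in all_other_edges or e[::-1] in all_other_edges])
def calcMatches (edges : List String) (allOtherEdges : PySem.Set String) : Int :=
  edges.foldl (fun c e =>
    if PySem.Set.contains allOtherEdges e || PySem.Set.contains allOtherEdges (pyRev e)
    then c + 1 else c) 0

def part1 (edges : List (Int × List String)) : Int :=
  -- the dict argument: duplicate keys overwritten in place, insertion order (PySem.Dict.ofList)
  let items := (PySem.Dict.ofList edges).items
  -- 'k is not id_' iterates the same dict's key objects, hence is exactly 'k ≠ id_' (keys are unique)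
  let corner : PySem.Set Int := items.foldl (fun s p =>
    let allOther : PySem.Set String :=
      PySem.Set.ofList ((items.filter (fun q => decide (q.1 ≠ p.1))).flatMap (·.2))
    if calcMatches p.2 allOther = 2 then PySem.Set.add s p.1 else s) PySem.Set.empty
  -- math.prod over a set: the product is order-independent, so the stored order is exact
  corner.foldl (· * ·) 1

-- ===== PORT B =====
-- min(e, e[::-1]); lexicographic min — on the printable-ASCII domain Lean's String order is Python's
def canon (s : String) : String := min s (pyRev s)

def buildOwners (items : List (Int × List String)) : PySem.Dict String (PySem.Set Int) :=
  items.foldl (fun ow p =>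
    p.2.foldl (fun ow e =>
      ow.insert (canon e) (PySem.Set.add (ow.getD (canon e) PySem.Set.empty) p.1)) ow)
    PySem.Dict.empty

def part1_alt (edges : List (Int × List String)) : Int :=
  let items := (PySem.Dict.ofList edges).items
  let owners := buildOwners items
  items.foldl (fun r p =>
    if (p.2.foldl (fun c e =>
          if (owners.getD (canon e) PySem.Set.empty).any (fun o => o != p.1)
          then c + 1 else c) (0 : Int)) = 2
    then r * p.1 else r) 1

-- ===== PRECONDITION & SPEC =====
def Spec_part1 (edges : List (Int × List String)) (out : Int) : Prop := out = part1_alt edges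
instance (edges : List (Int × List String)) (out : Int) : Decidable (Spec_part1 edges out) := by unfold Spec_part1; infer_instance

-- ===== CLAIM (what is proved, stated in full; the proofs are below) =====
def Claim_equal_part1 : Prop := ∀ (edges : List (Int × List String)), Dom_part1 edges → Spec_part1 edges (part1 edges)

-- ===== LEMMAS AND PROOFS =====

theorem toList_pyRev (s : String) : (pyRev s).toList = s.toList.reverse := by
  simp [pyRev, String.toList_ofList]

theorem pyRev_pyRev (s : String) : pyRev (pyRev s) = s := by
  apply String.toList_injective
  simp [toList_pyRev]

-- canonical classes: canon x = canon e ↔ x ∈ {e, rev e}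
theorem canon_eq_iff (x e : String) : canon x = canon e ↔ x = e ∨ x = pyRev e := by
  constructor
  · intro h
    have hx : canon x = x ∨ canon x = pyRev x := by
      unfold canon; rcases min_choice x (pyRev x) with h' | h' <;> simp [h']
    have he : canon e = e ∨ canon e = pyRev e := by
      unfold canon; rcases min_choice e (pyRev e) with h' | h' <;> simp [h']
    rcases hx with hx | hx <;> rcases he with he | he
    · left; rw [← hx, h, he]
    · right; rw [← hx, h, he]
    · right; rw [← pyRev_pyRev x, ← hx, h, he]
    · left; rw [← pyRev_pyRev x, ← hx, h, he, pyRev_pyRev]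
  · rintro (rfl | rfl)
    · rfl
    · unfold canon; rw [pyRev_pyRev]; exact min_comm _ _

theorem mem_owners_inner (es : List String) (ow : PySem.Dict String (PySem.Set Int))
    (tid : Int) (c : String) (t : Int) :
    t ∈ ((es.foldl (fun ow e =>
        ow.insert (canon e) (PySem.Set.add (ow.getD (canon e) PySem.Set.empty) tid)) ow).getD c PySem.Set.empty)
    ↔ t ∈ ow.getD c PySem.Set.empty ∨ (t = tid ∧ ∃ x ∈ es, canon x = c) := by
  induction es generalizing ow with
  | nil => simp
  | cons e es ih =>
    simp only [List.foldl_cons, ih, PySem.Dict.getD_insert, List.mem_cons]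
    by_cases hc : c = canon e
    · subst hc; simp [PySem.Set.mem_add]; tauto
    · simp only [if_neg hc]
      constructor
      · rintro (h | ⟨ht, x, hx, hcx⟩)
        · exact Or.inl h
        · exact Or.inr ⟨ht, x, Or.inr hx, hcx⟩
      · rintro (h | ⟨ht, x, rfl | hx, hcx⟩)
        · exact Or.inl h
        · exact absurd hcx.symm hc
        · exact Or.inr ⟨ht, x, hx, hcx⟩

theorem mem_buildOwners_aux (l : List (Int × List String)) (ow : PySem.Dict String (PySem.Set Int))
    (c : String) (t : Int) :
    t ∈ ((l.foldl (fun ow p =>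
        p.2.foldl (fun ow e =>
          ow.insert (canon e) (PySem.Set.add (ow.getD (canon e) PySem.Set.empty) p.1)) ow) ow).getD c PySem.Set.empty)
    ↔ t ∈ ow.getD c PySem.Set.empty ∨ ∃ p ∈ l, p.1 = t ∧ ∃ x ∈ p.2, canon x = c := by
  induction l generalizing ow with
  | nil => simp
  | cons p l ih =>
    simp only [List.foldl_cons, ih, mem_owners_inner, List.mem_cons]
    constructor
    · rintro ((h | ⟨rfl, hx⟩) | ⟨q, hq, hrest⟩)
      · exact Or.inl h
      · exact Or.inr ⟨p, Or.inl rfl, rfl, hx⟩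
      · exact Or.inr ⟨q, Or.inr hq, hrest⟩
    · rintro (h | ⟨q, (rfl | hq), rfl, hx⟩)
      · exact Or.inl (Or.inl h)
      · exact Or.inl (Or.inr ⟨rfl, hx⟩)
      · exact Or.inr ⟨q, hq, rfl, hx⟩

theorem mem_buildOwners (l : List (Int × List String)) (c : String) (t : Int) :
    t ∈ ((buildOwners l).getD c PySem.Set.empty)
    ↔ ∃ p ∈ l, p.1 = t ∧ ∃ x ∈ p.2, canon x = c := by
  unfold buildOwners
  rw [mem_buildOwners_aux]
  simp [PySem.Dict.getD_empty, PySem.Set.empty]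

theorem cond_eq (items : List (Int × List String)) (t : Int) (e : String) :
    (PySem.Set.contains (PySem.Set.ofList ((items.filter (fun q => decide (q.1 ≠ t))).flatMap (·.2))) e
      || PySem.Set.contains (PySem.Set.ofList ((items.filter (fun q => decide (q.1 ≠ t))).flatMap (·.2))) (pyRev e))
    = ((buildOwners items).getD (canon e) PySem.Set.empty).any (fun o => o != t) := by
  rw [Bool.eq_iff_iff]
  simp only [Bool.or_eq_true, PySem.Set.contains_iff, PySem.Set.mem_ofList, List.mem_flatMap,
    List.mem_filter, decide_eq_true_eq, List.any_eq_true, bne_iff_ne, ne_eq, mem_buildOwners]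
  constructor
  · rintro (⟨p, ⟨hp, hne⟩, he⟩ | ⟨p, ⟨hp, hne⟩, he⟩)
    · exact ⟨p.1, ⟨p, hp, rfl, e, he, rfl⟩, hne⟩
    · exact ⟨p.1, ⟨p, hp, rfl, pyRev e, he, (canon_eq_iff _ _).mpr (Or.inr rfl)⟩, hne⟩
  · rintro ⟨o, ⟨p, hp, rfl, x, hx, hcx⟩, hne⟩
    rcases (canon_eq_iff x e).mp hcx with rfl | rfl
    · exact Or.inl ⟨p, ⟨hp, hne⟩, hx⟩
    · exact Or.inr ⟨p, ⟨hp, hne⟩, hx⟩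

theorem corner_fold (l : List (Int × List String)) (cond : Int × List String → Prop)
    [DecidablePred cond] (s : List Int) (hnd : (s ++ l.map (·.1)).Nodup) :
    l.foldl (fun s p => if cond p then PySem.Set.add s p.1 else s) s
      = s ++ (l.filter (fun p => decide (cond p))).map (·.1) := by
  induction l generalizing s with
  | nil => simp
  | cons p l ih =>
    simp only [List.map_cons] at hnd
    have hmem : p.1 ∉ s := by
      intro h
      exact (List.disjoint_of_nodup_append hnd) h (List.mem_cons_self)
    simp only [List.foldl_cons, List.filter_cons]
    by_cases hcond : cond p
    · rw [if_pos hcond, PySem.Set.add_of_not_mem hmem,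
        ih (s ++ [p.1]) (by rw [List.append_assoc]; exact hnd)]
      simp [hcond]
    · rw [if_neg hcond,
        ih s (hnd.sublist ((List.append_sublist_append_left s).mpr (List.sublist_cons_self _ _)))]
      simp [hcond]

theorem count_congr (l : List String) (f g : String → Bool) (h : ∀ e, f e = g e) (c : Int) :
    l.foldl (fun c e => if f e then c + 1 else c) c
      = l.foldl (fun c e => if g e then c + 1 else c) c := by
  rw [funext h]

theorem part1_spec : Claim_equal_part1 := by
  intro edges _
  unfold Spec_part1 part1 part1_alt
  set items := (PySem.Dict.ofList edges).items with hitems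
  have hnd : ((items.map (·.1)) : List Int).Nodup := by
    have := PySem.Dict.nodup_keys_ofList (ps := edges)
    simpa [PySem.Dict.keys, hitems] using this
  have hcount : ∀ p : Int × List String,
      calcMatches p.2 (PySem.Set.ofList ((items.filter (fun q => decide (q.1 ≠ p.1))).flatMap (·.2)))
        = p.2.foldl (fun c e =>
            if ((buildOwners items).getD (canon e) PySem.Set.empty).any (fun o => o != p.1)
            then c + 1 else c) (0 : Int) := by
    intro p
    unfold calcMatches
    exact count_congr _ _ _ (fun e => cond_eq items p.1 e) 0
  change (items.foldl (fun s p =>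
      if calcMatches p.2 (PySem.Set.ofList ((items.filter (fun q => decide (q.1 ≠ p.1))).flatMap (·.2))) = 2
      then PySem.Set.add s p.1 else s) ([] : List Int)).foldl (· * ·) 1
    = items.foldl (fun r p =>
        if (p.2.foldl (fun c e =>
              if ((buildOwners items).getD (canon e) PySem.Set.empty).any (fun o => o != p.1)
              then c + 1 else c) (0 : Int)) = 2
        then r * p.1 else r) 1
  rw [corner_fold items _ [] (by simpa using hnd)]
  simp only [List.nil_append, List.foldl_map]
  rw [PySem.List.foldl_ite_eq_foldl_filter]
  congr 1
  apply List.filter_congr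
  intro p _
  simp only [hcount p]
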